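-- pv_equiv track=rewrite | github.com/liskos/kudryshov | demo2022/12.py | f
-- ===== SOURCE A (Python) =====
-- def f(n):
--     s = ">" + 39 * "0" + n * "1" + 39 * "2"
--     while ">1" in s or ">2" in s or ">0" in s:
--         if ">1" in s:
--             s = s.replace(">1","22>",1)
--         if ">2" in s:
--             s = s.replace(">2","2>",1)
--         if ">0" in s:
--             s = s.replace(">0","1>",1)
--     s = s[:-1]
--     return sum(map(int,s))
-- ===== SOURCE B (Python) =====
-- def f(n):
--     # Closed form: the head turns each of the 39 leading zeros into a 1 (sum 39),
--     # each of the max(n,0) ones into two 2s (sum 4*max(n,0)), and passes the 39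
--     # trailing 2s unchanged (sum 78): total 4*max(n,0) + 117.
--     return 4 * max(n, 0) + 117
-- ===== Notes on version B (the rewrite author's own statement) =====
-- stated objective: faster
-- what changed: Replaced the quadratic tape-head string-rewriting simulation with the closed form 4*max(n,0)+117, derived from the invariant that each leading zero contributes 1, each of the n ones contributes two 2s, and each trailing 2 contributes 2.
import Mathlib
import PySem

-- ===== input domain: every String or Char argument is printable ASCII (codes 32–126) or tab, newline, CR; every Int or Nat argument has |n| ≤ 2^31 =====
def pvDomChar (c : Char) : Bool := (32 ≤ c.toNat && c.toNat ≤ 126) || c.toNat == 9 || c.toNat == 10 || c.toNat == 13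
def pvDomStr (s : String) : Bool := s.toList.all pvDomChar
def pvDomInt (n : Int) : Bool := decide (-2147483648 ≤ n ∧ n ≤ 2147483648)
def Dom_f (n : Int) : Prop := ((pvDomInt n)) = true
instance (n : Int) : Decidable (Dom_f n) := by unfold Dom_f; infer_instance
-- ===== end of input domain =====

-- B replaces A's quadratic tape-head string-rewriting simulation with the closed form
-- 4*max(n,0) + 117 (objective: faster).

-- ===== PORT A =====
-- Python's s.replace(old, new, 1): replace the FIRST occurrence of `old`.
-- Hand-ported (PySem.Str.replace replaces all occurrences); exact for old ≠ [],
-- which is the only way A uses it.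
def pyReplace1 (s old new : List Char) : List Char :=
  match s with
  | [] => []
  | c :: rest =>
    if old.isPrefixOf (c :: rest) then new ++ (c :: rest).drop old.length
    else c :: pyReplace1 rest old new

-- A's while loop; `fuel` only makes the recursion total (one unit per iteration;
-- f supplies s.length fuel and the proofs show it is never exhausted).
def loopA (fuel : Nat) (s : List Char) : List Char :=
  match fuel with
  | 0 => s
  | fuel + 1 =>
    if PySem.Chars.isIn ['>', '1'] s || PySem.Chars.isIn ['>', '2'] s
        || PySem.Chars.isIn ['>', '0'] s then
      let s1 := if PySem.Chars.isIn ['>', '1'] s then pyReplace1 s ['>', '1'] ['2', '2', '>'] else s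
      let s2 := if PySem.Chars.isIn ['>', '2'] s1 then pyReplace1 s1 ['>', '2'] ['2', '>'] else s1
      let s3 := if PySem.Chars.isIn ['>', '0'] s2 then pyReplace1 s2 ['>', '0'] ['1', '>'] else s2
      loopA fuel s3
    else s

def f (n : Int) : Int :=
  -- s = ">" + 39*"0" + n*"1" + 39*"2"   (n*"1" has n.toNat = max(n,0) copies)
  let s : List Char :=
    '>' :: (List.replicate 39 '0' ++ List.replicate n.toNat '1' ++ List.replicate 39 '2')
  let s' := loopA s.length s
  -- s = s[:-1]
  let s'' := PySem.List.slice s' none (some (-1))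
  -- sum(map(int, s)); every char of s'' is a digit (proved below), so int(c) never raises
  (s''.map (fun c => (PySem.Int.ofChars? [c]).getD 0)).sum

-- ===== PORT B =====
def f_alt (n : Int) : Int := 4 * max n 0 + 117

-- ===== PRECONDITION & SPEC =====
def Spec_f (n : Int) (out : Int) : Prop := out = f_alt n
instance (n : Int) (out : Int) : Decidable (Spec_f n out) := by unfold Spec_f; infer_instance

-- ===== CLAIM (what is proved, stated in full; the proofs are below) =====
def Claim_equal_f : Prop := ∀ (n : Int), Dom_f n → Spec_f n (f n)

-- ===== LEMMAS AND PROOFS =====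

-- The tape right of the head: z zeros, then o ones, then t twos.
def stR (z o t : Nat) : List Char :=
  List.replicate z '0' ++ List.replicate o '1' ++ List.replicate t '2'

-- A reachable tape: a ones and b twos already written, head '>', then stR z o t.
def st (a b z o t : Nat) : List Char :=
  List.replicate a '1' ++ List.replicate b '2' ++ '>' :: stR z o t

lemma not_mem_stR (z o t : Nat) : '>' ∉ stR z o t := by
  simp [stR, List.mem_replicate]

-- The pattern ['>', x] sits in a tape with a unique '>' iff x is the char right of the head.
lemma marker_aux (x : Char) (r : List Char) :
    ∀ (A l R : List Char), '>' ∉ A → '>' ∉ R →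
      l ++ '>' :: x :: r = A ++ '>' :: R → ∃ R', R = x :: R' := by
  intro A
  induction A with
  | nil =>
    intro l R hA hR h
    cases l with
    | nil =>
      rw [List.nil_append, List.nil_append] at h
      injection h with h1 h2
      exact ⟨r, h2.symm⟩
    | cons c l' =>
      rw [List.cons_append, List.nil_append] at h
      injection h with h1 h2
      exact absurd (h2 ▸ (by simp : ('>' : Char) ∈ l' ++ '>' :: x :: r)) hR
  | cons a A' ih =>
    intro l R hA hR h
    cases l with
    | nil =>
      rw [List.nil_append, List.cons_append] at h
      injection h with h1 h2
      exact absurd (by simp [← h1]) hA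
    | cons c l' =>
      rw [List.cons_append, List.cons_append] at h
      injection h with h1 h2
      exact ih l' R (fun m => hA (List.mem_cons_of_mem _ m)) hR h2

lemma marker_infix {A R : List Char} (hA : '>' ∉ A) (hR : '>' ∉ R) (x : Char) :
    ['>', x] <:+: (A ++ '>' :: R) ↔ ∃ R', R = x :: R' := by
  constructor
  · rintro ⟨l, rr, h⟩
    have h' : l ++ '>' :: x :: rr = A ++ '>' :: R := by simpa using h
    exact marker_aux x rr A l R hA hR h'
  · rintro ⟨R', rfl⟩
    exact ⟨A, R', by simp⟩

lemma pyReplace1_at {A R new : List Char} (x : Char) (hA : '>' ∉ A) :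
    pyReplace1 (A ++ '>' :: x :: R) ['>', x] new = A ++ (new ++ R) := by
  induction A with
  | nil => simp [pyReplace1, List.isPrefixOf]
  | cons c A' ih =>
    have hc : ('>' == c) = false := by
      refine beq_eq_false_iff_ne.mpr ?_
      intro h
      exact hA (List.mem_cons.mpr (Or.inl h))
    simp [pyReplace1, List.isPrefixOf, hc, ih (fun m => hA (List.mem_cons_of_mem _ m))]

-- isIn characterisations on reachable tapes
lemma isIn_st (a b z o t : Nat) (x : Char) :
    PySem.Chars.isIn ['>', x] (st a b z o t) = true ↔ ∃ R', stR z o t = x :: R' := by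
  rw [st, PySem.Chars.isIn_iff_infix]
  exact marker_infix (by simp [List.mem_replicate]) (not_mem_stR z o t) x

lemma isIn_st_false (a b z o t : Nat) (x : Char)
    (h : ¬ ∃ R', stR z o t = x :: R') :
    PySem.Chars.isIn ['>', x] (st a b z o t) = false := by
  rw [← Bool.not_eq_true, isIn_st]; exact h

-- stR head shapes
lemma stR_zero_zero_zero : stR 0 0 0 = [] := by simp [stR]
lemma stR_z_succ (z o t : Nat) : stR (z+1) o t = '0' :: stR z o t := by
  simp [stR, List.replicate_succ]
lemma stR_o_succ (o t : Nat) : stR 0 (o+1) t = '1' :: stR 0 o t := by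
  simp [stR, List.replicate_succ]
lemma stR_t_succ (t : Nat) : stR 0 0 (t+1) = '2' :: stR 0 0 t := by
  simp [stR, List.replicate_succ]

-- one replacement, on reachable tapes
lemma replace_st_zero (a z o t : Nat) :
    pyReplace1 (st a 0 (z+1) o t) ['>', '0'] ['1', '>'] = st (a+1) 0 z o t := by
  have h := pyReplace1_at (A := List.replicate a '1') (R := stR z o t)
    (new := ['1', '>']) '0' (by simp [List.mem_replicate])
  rw [st, st, stR_z_succ]
  simp only [List.replicate_zero, List.append_nil]
  rw [h, List.replicate_succ', List.append_assoc]
  simp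

lemma replace_st_one (a b o t : Nat) :
    pyReplace1 (st a b 0 (o+1) t) ['>', '1'] ['2', '2', '>']
      = st a (b+2) 0 o t := by
  have h := pyReplace1_at (A := List.replicate a '1' ++ List.replicate b '2')
    (R := stR 0 o t) (new := ['2', '2', '>']) '1' (by simp [List.mem_replicate])
  simp only [st, stR_o_succ, ← List.append_assoc] at h ⊢
  rw [h]
  simp [List.replicate_succ' (n := b+1), List.replicate_succ' (n := b)]

lemma replace_st_two (a b t : Nat) :
    pyReplace1 (st a b 0 0 (t+1)) ['>', '2'] ['2', '>']
      = st a (b+1) 0 0 t := by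
  have h := pyReplace1_at (A := List.replicate a '1' ++ List.replicate b '2')
    (R := stR 0 0 t) (new := ['2', '>']) '2' (by simp [List.mem_replicate])
  simp only [st, stR_t_succ, ← List.append_assoc] at h ⊢
  rw [h]
  simp [List.replicate_succ' (n := b)]

-- phase 3: only twos remain right of the head
lemma loopA_phase3 (t : Nat) : ∀ (a b fuel : Nat), t ≤ fuel →
    loopA fuel (st a b 0 0 t)
      = List.replicate a '1' ++ List.replicate (b + t) '2' ++ ['>'] := by
  induction t with
  | zero =>
    intro a b fuel _
    have h1 := isIn_st_false a b 0 0 0 '1' (by simp [stR_zero_zero_zero])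
    have h2 := isIn_st_false a b 0 0 0 '2' (by simp [stR_zero_zero_zero])
    have h0 := isIn_st_false a b 0 0 0 '0' (by simp [stR_zero_zero_zero])
    cases fuel with
    | zero => simp [loopA, st, stR]
    | succ fuel =>
      rw [loopA]
      simp only [h1, h2, h0]
      simp [st, stR]
  | succ t ih =>
    intro a b fuel hf
    obtain ⟨fuel, rfl⟩ : ∃ f', fuel = f' + 1 := ⟨fuel - 1, by omega⟩
    have h1 := isIn_st_false a b 0 0 (t+1) '1' (by simp [stR_t_succ])
    have h2 : PySem.Chars.isIn ['>', '2'] (st a b 0 0 (t+1)) = true :=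
      (isIn_st a b 0 0 (t+1) '2').mpr ⟨stR 0 0 t, stR_t_succ t⟩
    have h0 := isIn_st_false a (b+1) 0 0 t '0'
      (by cases t <;> simp [stR_zero_zero_zero, stR_t_succ])
    rw [loopA]
    simp [h1, h2, h0, replace_st_two]
    rw [ih a (b+1) fuel (by omega)]
    have e : b + 1 + t = b + (t + 1) := by omega
    rw [e]
    try simp [List.append_assoc]

-- phase 2: ones (then twos) remain right of the head
lemma loopA_phase2 (o : Nat) : ∀ (t a b fuel : Nat), o + t ≤ fuel →
    loopA fuel (st a b 0 o t)
      = List.replicate a '1' ++ List.replicate (b + 2 * o + t) '2' ++ ['>'] := by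
  induction o with
  | zero =>
    intro t a b fuel hf
    rw [loopA_phase3 t a b fuel (by omega)]
    simp
  | succ o ih =>
    intro t a b fuel hf
    obtain ⟨fuel, rfl⟩ : ∃ f', fuel = f' + 1 := ⟨fuel - 1, by omega⟩
    have h1 : PySem.Chars.isIn ['>', '1'] (st a b 0 (o+1) t) = true :=
      (isIn_st a b 0 (o+1) t '1').mpr ⟨stR 0 o t, stR_o_succ o t⟩
    rw [loopA]
    simp [h1, replace_st_one]
    cases o with
    | zero =>
      cases t with
      | zero =>
        have h2 := isIn_st_false a (b+2) 0 0 0 '2' (by simp [stR_zero_zero_zero])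
        have h0 := isIn_st_false a (b+2) 0 0 0 '0' (by simp [stR_zero_zero_zero])
        simp [h2, h0]
        rw [loopA_phase3 0 a (b+2) fuel (by omega)]
        have e : b + 2 + 0 = b + 2 * 1 + 0 := by omega
        rw [e]
        try simp [List.append_assoc]
      | succ t =>
        have h2 : PySem.Chars.isIn ['>', '2'] (st a (b+2) 0 0 (t+1)) = true :=
          (isIn_st a (b+2) 0 0 (t+1) '2').mpr ⟨stR 0 0 t, stR_t_succ t⟩
        have h0 := isIn_st_false a (b+3) 0 0 t '0'
          (by cases t <;> simp [stR_zero_zero_zero, stR_t_succ])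
        simp [h2, replace_st_two, h0]
        rw [loopA_phase3 t a (b+3) fuel (by omega)]
        have e : b + 3 + t = b + 2 * 1 + (t + 1) := by omega
        rw [e]
        try simp [List.append_assoc]
    | succ o' =>
      have h2 := isIn_st_false a (b+2) 0 (o'+1) t '2' (by simp [stR_o_succ])
      have h0 := isIn_st_false a (b+2) 0 (o'+1) t '0' (by simp [stR_o_succ])
      simp [h2, h0]
      rw [ih t a (b+2) fuel (by omega)]
      have e : b + 2 + 2 * (o' + 1) + t = b + 2 * (o' + 1 + 1) + t := by omega
      rw [e]
      try simp [List.append_assoc]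

-- phase 1: zeros remain right of the head
lemma loopA_phase1 (z : Nat) : ∀ (o t a fuel : Nat), z + o + t ≤ fuel →
    loopA fuel (st a 0 z o t)
      = List.replicate (a + z) '1' ++ List.replicate (2 * o + t) '2' ++ ['>'] := by
  induction z with
  | zero =>
    intro o t a fuel hf
    rw [loopA_phase2 o t a 0 fuel (by omega)]
    simp
  | succ z ih =>
    intro o t a fuel hf
    obtain ⟨fuel, rfl⟩ : ∃ f', fuel = f' + 1 := ⟨fuel - 1, by omega⟩
    have h1 := isIn_st_false a 0 (z+1) o t '1' (by simp [stR_z_succ])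
    have h2 := isIn_st_false a 0 (z+1) o t '2' (by simp [stR_z_succ])
    have h0 : PySem.Chars.isIn ['>', '0'] (st a 0 (z+1) o t) = true :=
      (isIn_st a 0 (z+1) o t '0').mpr ⟨stR z o t, stR_z_succ z o t⟩
    rw [loopA]
    simp [h1, h2, h0, replace_st_zero]
    rw [ih o t (a+1) fuel (by omega)]
    have e : a + 1 + z = a + (z + 1) := by omega
    rw [e]
    try simp [List.append_assoc]

-- ===== VERDICT (by name: the statement is the Claim_ definition above) =====
theorem f_spec : Claim_equal_f := by
  intro n _
  unfold Spec_f f f_alt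
  dsimp only
  have hinit : '>' :: (List.replicate 39 '0' ++ List.replicate n.toNat '1' ++ List.replicate 39 '2')
      = st 0 0 39 n.toNat 39 := by simp [st, stR]
  rw [hinit]
  rw [loopA_phase1 39 n.toNat 39 0 ((st 0 0 39 n.toNat 39).length) (by simp [st, stR]; omega)]
  rw [PySem.List.slice_to_neg_one, List.dropLast_concat]
  simp only [List.map_append, List.map_replicate, List.sum_append, List.sum_replicate,
    nsmul_eq_mul]
  have h1 : (PySem.Int.ofChars? ['1']).getD 0 = 1 := by decide
  have h2 : (PySem.Int.ofChars? ['2']).getD 0 = 2 := by decide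
  rw [h1, h2]
  have hmax : max n 0 = (n.toNat : Int) := by omega
  rw [hmax]
  push_cast
  ring
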